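-- pv_equiv track=rewrite | github.com/smeingast/vircampype | vircampype/tools/fitstools.py | _compute_tile_edges
-- ===== SOURCE A (Python) =====
-- def _compute_tile_edges(n: int, ntiles: int) -> list[tuple[int, int]]:
--     """
--     Split [0, n) into *ntiles* contiguous ranges whose union covers the interval.
--
--     Returns list of (start, end) with end exclusive. First tiles may be 1 pixel
--     larger when *n* is not evenly divisible.
--     """
--     base = n // ntiles
--     rem = n % ntiles
--     edges = []
--     start = 0
--     for i in range(ntiles):
--         size = base + (1 if i < rem else 0)
--         edges.append((start, start + size))
--         start += size
--     return edges
-- ===== SOURCE B (Python) =====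
-- def _compute_tile_edges(n: int, ntiles: int) -> list[tuple[int, int]]:
--     base = n // ntiles
--     rem = n % ntiles
--     return [(i * base + min(i, rem), (i + 1) * base + min(i + 1, rem))
--             for i in range(ntiles)]
-- ===== Notes on version B (the rewrite author's own statement) =====
-- stated objective: simpler
-- what changed: Replaced the running `start` accumulator loop by a stateless list comprehension computing each tile's edges in closed form from its index: start_i = i*base + min(i, rem).
import Mathlib
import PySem

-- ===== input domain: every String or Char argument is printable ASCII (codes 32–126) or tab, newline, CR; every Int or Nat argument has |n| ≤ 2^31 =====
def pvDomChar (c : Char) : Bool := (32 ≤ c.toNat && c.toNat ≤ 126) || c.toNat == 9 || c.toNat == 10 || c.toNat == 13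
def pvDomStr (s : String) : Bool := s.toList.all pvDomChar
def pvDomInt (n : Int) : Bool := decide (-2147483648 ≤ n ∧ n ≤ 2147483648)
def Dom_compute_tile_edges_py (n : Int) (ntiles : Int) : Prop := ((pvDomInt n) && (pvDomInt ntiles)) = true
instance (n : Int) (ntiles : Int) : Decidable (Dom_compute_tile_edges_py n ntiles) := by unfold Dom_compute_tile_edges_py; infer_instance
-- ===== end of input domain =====

-- B replaces A's running `start` accumulator by a stateless closed form per tile index; objective: simpler.


-- ===== PORT A =====
-- literal transliteration of A: accumulator loop over range(ntiles) carrying (edges, start)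
-- loop body of A, as a named helper
def tileStep (base rem : Int) (st : List (Int × Int) × Int) (i : Int) : List (Int × Int) × Int :=
  let size := base + (if i < rem then 1 else 0)
  (st.1 ++ [(st.2, st.2 + size)], st.2 + size)

def compute_tile_edges_py (n : Int) (ntiles : Int) : List (Int × Int) :=
  let base := PySem.Int.floordiv n ntiles
  let rem := PySem.Int.mod n ntiles
  ((PySem.List.pyRange 0 ntiles 1).foldl (tileStep base rem) ([], 0)).1

-- ===== PORT B =====
-- literal transliteration of B: closed-form edges per index, list comprehension
def compute_tile_edges_py_alt (n : Int) (ntiles : Int) : List (Int × Int) :=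
  let base := PySem.Int.floordiv n ntiles
  let rem := PySem.Int.mod n ntiles
  (PySem.List.pyRange 0 ntiles 1).map
    (fun i => (i * base + min i rem, (i + 1) * base + min (i + 1) rem))

-- ===== PRECONDITION & SPEC =====
-- Pre_ excludes exactly ntiles = 0, where both A and B raise ZeroDivisionError on n // ntiles.
def Pre_compute_tile_edges_py (n : Int) (ntiles : Int) : Prop := ntiles ≠ 0
instance (n : Int) (ntiles : Int) : Decidable (Pre_compute_tile_edges_py n ntiles) := by unfold Pre_compute_tile_edges_py; infer_instance
def pvWitness_compute_tile_edges_py : Int × Int := (10, 3)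

def Spec_compute_tile_edges_py (n : Int) (ntiles : Int) (out : List (Int × Int)) : Prop := out = compute_tile_edges_py_alt n ntiles
instance (n : Int) (ntiles : Int) (out : List (Int × Int)) : Decidable (Spec_compute_tile_edges_py n ntiles out) := by unfold Spec_compute_tile_edges_py; infer_instance

-- ===== CLAIM (what is proved, stated in full; the proofs are below) =====
def Claim_equal_compute_tile_edges_py : Prop := ∀ (n : Int) (ntiles : Int), Dom_compute_tile_edges_py n ntiles → Pre_compute_tile_edges_py n ntiles → Spec_compute_tile_edges_py n ntiles (compute_tile_edges_py n ntiles)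

-- ===== LEMMAS AND PROOFS =====

-- A's loop starting at index a with start = a*base + min a rem produces exactly B's map over [a, b).
theorem tile_loop (base rem : Int) (hrem : 0 ≤ rem) :
    ∀ (k : Nat) (a b : Int), (b - a).toNat = k → 0 ≤ a →
    ∀ (acc : List (Int × Int)),
    ((PySem.List.pyRange a b 1).foldl (tileStep base rem) (acc, a * base + min a rem)).1
    = acc ++ (PySem.List.pyRange a b 1).map
        (fun i => (i * base + min i rem, (i + 1) * base + min (i + 1) rem)) := by
  intro k
  induction k with
  | zero =>
    intro a b hk ha acc
    rw [PySem.List.pyRange_one_eq_nil (by omega)]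
    simp
  | succ k ih =>
    intro a b hk ha acc
    have hab : a < b := by omega
    rw [PySem.List.pyRange_one_cons hab]
    simp only [List.foldl_cons, List.map_cons]
    have hstart : a * base + min a rem + (base + (if a < rem then 1 else 0))
        = (a + 1) * base + min (a + 1) rem := by
      have hb : (a + 1) * base = a * base + base := by ring
      rcases lt_or_ge a rem with h | h
      · rw [min_eq_left (by omega), min_eq_left (by omega), if_pos h, hb]; ring
      · rw [min_eq_right (by omega), min_eq_right (by omega), if_neg (not_lt.mpr h), hb]; ring
    have hstep : tileStep base rem (acc, a * base + min a rem) a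
        = (acc ++ [(a * base + min a rem, (a + 1) * base + min (a + 1) rem)],
           (a + 1) * base + min (a + 1) rem) := by
      simp only [tileStep, hstart]
    rw [hstep, ih (a + 1) b (by omega) (by omega)]
    simp

-- ===== VERDICT (by name: the statement is the Claim_ definition above) =====
theorem compute_tile_edges_py_spec : Claim_equal_compute_tile_edges_py := by
  intro n ntiles _ hpre
  unfold Spec_compute_tile_edges_py compute_tile_edges_py compute_tile_edges_py_alt
  rcases lt_trichotomy ntiles 0 with h | h | h
  · rw [PySem.List.pyRange_one_eq_nil (by omega)]
    simp
  · exact absurd h hpre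
  · have hrem : 0 ≤ PySem.Int.mod n ntiles := PySem.Int.mod_nonneg n h
    have hthis := tile_loop (PySem.Int.floordiv n ntiles) (PySem.Int.mod n ntiles) hrem
      ntiles.toNat 0 ntiles (by omega) (by omega) []
    have h0 : (0 : Int) * PySem.Int.floordiv n ntiles + min 0 (PySem.Int.mod n ntiles) = 0 := by
      rw [min_eq_left hrem]; ring
    rw [h0] at hthis
    simpa using hthis
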